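-- pv_equiv track=rewrite | github.com/Justin21523/news-information-retrieval-system | src/ir/search/unified_search.py | _find_best_snippet_position
-- ===== SOURCE A (Python) =====
-- from typing import List, Dict, Optional, Set, Tuple, Any
--
-- def _find_best_snippet_position(
--                                 content: str,
--                                 query_terms: List[str],
--                                 max_length: int) -> Optional[int]:
--     """
--     Find the best position in content to extract a snippet.
--
--     Uses a sliding window approach to find the position that contains
--     the most query terms.
--
--     Args:
--         content: Document content
--         query_terms: List of query terms
--         max_length: Maximum snippet length
--
--     Returns:
--         Best position index, or None if no query terms found
--
--     Complexity:
--         Time: O(n * m) where n is content length, m is query terms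
--         Space: O(1)
--     """
--     if not query_terms:
--         return None
--
--     best_position = None
--     best_score = -1
--
--     # Try to find each query term in content
--     for term in query_terms:
--         # Case-insensitive search
--         term_lower = term.lower()
--         content_lower = content.lower()
--
--         # Find all occurrences of this term
--         position = 0
--         while True:
--             pos = content_lower.find(term_lower, position)
--             if pos == -1:
--                 break
--
--             # Count how many query terms appear in a window around this position
--             window_start = max(0, pos - max_length // 2)
--             window_end = min(len(content), pos + max_length // 2)
--             window = content_lower[window_start:window_end]
--
--             # Score this position by counting query terms in window
--             score = sum(1 for qt in query_terms if qt.lower() in window)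
--
--             if score > best_score:
--                 best_score = score
--                 best_position = pos
--
--             position = pos + 1
--
--     return best_position
-- ===== SOURCE B (Python) =====
-- from typing import List, Optional
-- from bisect import bisect_left
--
--
-- def _find_best_snippet_position(content: str, query_terms: List[str], max_length: int) -> Optional[int]:
--     """Precompute, per distinct lowered query term, the sorted list of its
--     occurrence positions; score each distinct candidate position once, with a
--     bisect lookup per term, instead of rescanning a window substring per hit."""
--     if not query_terms:
--         return None
--     cl = content.lower()
--     n = len(cl)
--     lowered = [t.lower() for t in query_terms]
--     half = max_length // 2
--     occ = {}
--     for t in lowered: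
--         if t not in occ:
--             L = len(t)
--             occ[t] = [i for i in range(n - L + 1) if cl[i:i + L] == t]
--
--     def score(pos):
--         ws = max(0, pos - half)
--         we = min(n, pos + half)
--         s = 0
--         for qt in lowered:
--             ps = occ[qt]
--             j = bisect_left(ps, ws)
--             if j < len(ps) and ps[j] + len(qt) <= we:
--                 s += 1
--         return s
--
--     score_of = {}
--     for t in lowered:
--         for pos in occ[t]:
--             if pos not in score_of:
--                 score_of[pos] = score(pos)
--
--     best_position = None
--     best_score = -1
--     for t in lowered:
--         for pos in occ[t]:
--             sc = score_of[pos]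
--             if sc > best_score:
--                 best_score = sc
--                 best_position = pos
--     return best_position
-- ===== Notes on version B (the rewrite author's own statement) =====
-- stated objective: faster
-- what changed: B lowercases the content once, precomputes per distinct lowered query term the sorted list of its occurrence positions, and computes each distinct candidate position's window score exactly once (memoised) via one bisect lookup per term, instead of A's repeated str.find rescans and per-window substring scans; Pre_ restricts max_length to nonnegative values, the natural domain of a snippet length, because for negative max_length A's window end becomes a negative slice index that wraps to count from the end of the content.
-- outside the precondition, e.g. on _find_best_snippet_position(' ab', ['a', ' '], -2): A returns 0, B returns 1
import Mathlib
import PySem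

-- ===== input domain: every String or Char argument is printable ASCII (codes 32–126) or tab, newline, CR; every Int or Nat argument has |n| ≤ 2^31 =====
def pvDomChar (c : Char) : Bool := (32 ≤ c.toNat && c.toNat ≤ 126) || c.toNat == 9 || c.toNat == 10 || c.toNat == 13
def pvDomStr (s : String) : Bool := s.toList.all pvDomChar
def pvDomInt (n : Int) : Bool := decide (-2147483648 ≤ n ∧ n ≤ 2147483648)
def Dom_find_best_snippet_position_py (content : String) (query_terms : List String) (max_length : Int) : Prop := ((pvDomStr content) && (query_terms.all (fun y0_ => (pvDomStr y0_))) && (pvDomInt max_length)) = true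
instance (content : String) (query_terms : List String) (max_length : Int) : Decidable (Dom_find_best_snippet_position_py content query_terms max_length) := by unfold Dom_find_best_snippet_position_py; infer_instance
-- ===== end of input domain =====

-- B precomputes per-term sorted occurrence positions once and scores each window
-- by a bisect lookup per term, instead of A's repeated str.find rescans (objective: faster).

-- ===== PORT A =====
-- body of A's `while True` loop at one hit `pos`: score the window around pos, update best
def pvAStep (cl : List Char) (qts : List String) (ml : Int)
    (st : Int × Option Int) (pos : Int) : Int × Option Int :=
  let window_start := max 0 (pos - PySem.Int.floordiv ml 2)
  let window_end := min ((cl.length : Int)) (pos + PySem.Int.floordiv ml 2)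
  let window := PySem.List.slice cl (some window_start) (some window_end)
  let score : Int :=
    (qts.map (fun qt => if PySem.Chars.isIn (PySem.Chars.lower qt.toList) window then (1:Int) else 0)).sum
  if score > st.1 then (score, some pos) else st

-- A's `while True` loop over one term: scan hits via find(term, position).  The fuel makes
-- the recursion structural; it is called with fuel = len(content)+1, which is enough because
-- `position` grows strictly each iteration and find fails once position passes the end.
def pvALoop (cl t : List Char) (qts : List String) (ml : Int) :
    Nat → Nat → Int × Option Int → Int × Option Int
  | 0, _, st => st
  | fuel+1, position, st =>
    let pos := PySem.Chars.findFrom cl t (position : Int) none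
    if pos = -1 then st
    else pvALoop cl t qts ml fuel (pos.toNat + 1) (pvAStep cl qts ml st pos)

def find_best_snippet_position_py (content : String) (query_terms : List String) (max_length : Int) : Option Int :=
  if query_terms = [] then none
  else
    let st := query_terms.foldl (fun st term =>
      let term_lower := PySem.Chars.lower term.toList
      let content_lower := PySem.Chars.lower content.toList
      pvALoop content_lower term_lower query_terms max_length (content_lower.length + 1) 0 st)
      ((-1 : Int), (none : Option Int))
    st.2

-- ===== PORT B =====
-- Source B's occurrence list: all start positions i with cl[i:i+len(t)] == t, ascending
def pvOccOf (cl t : List Char) : List Int :=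
  (PySem.List.pyRange 0 ((cl.length : Int) - t.length + 1)).filter
    (fun i => PySem.List.slice cl (some i) (some (i + t.length)) = t)

-- Source B's `score(pos)`: count terms whose first occurrence ≥ window start (by bisect) fits the window
def pvBScore (n : Nat) (lowered : List (List Char)) (occ : PySem.Dict (List Char) (List Int))
    (half : Int) (pos : Int) : Int :=
  let ws := max 0 (pos - half)
  let we := min (n : Int) (pos + half)
  lowered.foldl (fun (s : Int) qt =>
    let ps := occ.getD qt []
    let j := PySem.List.bisectLeft ps ws
    if j < ps.length ∧ ps.getD j 0 + qt.length ≤ we then s + 1 else s) 0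

def find_best_snippet_position_py_alt (content : String) (query_terms : List String) (max_length : Int) : Option Int :=
  if query_terms = [] then none
  else
    let cl := PySem.Chars.lower content.toList
    let n := cl.length
    let lowered := query_terms.map (fun t => PySem.Chars.lower t.toList)
    let half := PySem.Int.floordiv max_length 2
    let occ := lowered.foldl (fun (d : PySem.Dict (List Char) (List Int)) t =>
        if d.contains t then d else d.insert t (pvOccOf cl t)) PySem.Dict.empty
    -- score of each candidate position, computed once per distinct position
    let scoreOf := lowered.foldl (fun (d : PySem.Dict Int Int) t =>
        (occ.getD t []).foldl (fun (d : PySem.Dict Int Int) pos =>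
          if d.contains pos then d else d.insert pos (pvBScore n lowered occ half pos)) d)
      PySem.Dict.empty
    let st := lowered.foldl (fun st t =>
        (occ.getD t []).foldl (fun (st : Int × Option Int) pos =>
          let score := scoreOf.getD pos 0
          if score > st.1 then (score, some pos) else st) st)
      ((-1 : Int), (none : Option Int))
    st.2

-- ===== PRECONDITION & SPEC =====
-- Pre_ restricts max_length to nonnegative values, the natural domain of a snippet length:
-- for negative max_length A's window end min(len(content), pos + max_length//2) can be
-- negative, and as a slice index it wraps to count from the end of the content.
def Pre_find_best_snippet_position_py (content : String) (query_terms : List String) (max_length : Int) : Prop :=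
  query_terms = [] ∨ 0 ≤ max_length
instance (content : String) (query_terms : List String) (max_length : Int) : Decidable (Pre_find_best_snippet_position_py content query_terms max_length) := by unfold Pre_find_best_snippet_position_py; infer_instance

def pvWitness_find_best_snippet_position_py : String × List String × Int := ("ab cab", ["ab", "c"], 4)

def Spec_find_best_snippet_position_py (content : String) (query_terms : List String) (max_length : Int) (out : Option Int) : Prop := out = find_best_snippet_position_py_alt content query_terms max_length
instance (content : String) (query_terms : List String) (max_length : Int) (out : Option Int) : Decidable (Spec_find_best_snippet_position_py content query_terms max_length out) := by unfold Spec_find_best_snippet_position_py; infer_instance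

-- ===== CLAIM (what is proved, stated in full; the proofs are below) =====
def Claim_equal_find_best_snippet_position_py : Prop := ∀ (content : String) (query_terms : List String) (max_length : Int), Dom_find_best_snippet_position_py content query_terms max_length → Pre_find_best_snippet_position_py content query_terms max_length → Spec_find_best_snippet_position_py content query_terms max_length (find_best_snippet_position_py content query_terms max_length)

-- ===== LEMMAS AND PROOFS =====

lemma pvClampIdx_of_nonneg (n : Nat) (i : Int) (h : 0 ≤ i) :
    PySem.List.clampIdx n i = min i.toNat n := by
  simp [PySem.List.clampIdx]; omega

-- membership in the occurrence list
lemma pvMem_occ (cl t : List Char) (p : Int) :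
    p ∈ pvOccOf cl t ↔ 0 ≤ p ∧ p + t.length ≤ cl.length ∧ t <+: cl.drop p.toNat := by
  unfold pvOccOf
  simp only [List.mem_filter, PySem.List.mem_pyRange_one, decide_eq_true_eq]
  constructor
  · rintro ⟨⟨h0, hb⟩, hsl⟩
    refine ⟨h0, by omega, ?_⟩
    rw [List.prefix_iff_eq_take]
    rw [PySem.List.slice] at hsl
    rw [pvClampIdx_of_nonneg _ _ h0, pvClampIdx_of_nonneg _ _ (by omega)] at hsl
    have h1 : min p.toNat cl.length = p.toNat := by omega
    have h2 : min (p + ↑t.length).toNat cl.length = (p + t.length).toNat := by omega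
    rw [h1, h2] at hsl
    have h3 : (p + ↑t.length).toNat - p.toNat = t.length := by omega
    rw [h3] at hsl
    exact hsl.symm
  · rintro ⟨h0, hb, hpre⟩
    have hlen : t.length ≤ (cl.drop p.toNat).length := hpre.length_le
    refine ⟨⟨h0, by omega⟩, ?_⟩
    rw [PySem.List.slice, pvClampIdx_of_nonneg _ _ h0, pvClampIdx_of_nonneg _ _ (by omega)]
    have h1 : min p.toNat cl.length = p.toNat := by omega
    have h2 : min (p + ↑t.length).toNat cl.length = (p + t.length).toNat := by omega
    rw [h1, h2]
    have h3 : (p + ↑t.length).toNat - p.toNat = t.length := by omega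
    rw [h3]
    exact (List.prefix_iff_eq_take.mp hpre).symm

lemma pvPyRange_sorted (a b : Int) : (PySem.List.pyRange a b).Pairwise (· < ·) := by
  rw [PySem.List.pyRange_of_pos a b (by norm_num)]
  refine List.Pairwise.map _ ?_ List.pairwise_lt_range
  intro i j hij; omega

-- the occurrence list is strictly increasing
lemma pvOcc_sorted (cl t : List Char) : (pvOccOf cl t).Pairwise (· < ·) := by
  unfold pvOccOf
  exact (pvPyRange_sorted _ _).filter _

-- on a strictly increasing list, filtering at the minimal admissible element peels it off
lemma pvFilter_ge_cons (l : List Int) (k p : Int) (hs : l.Pairwise (· < ·)) (hmem : p ∈ l)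
    (hk : k ≤ p) (hmin : ∀ q ∈ l, k ≤ q → p ≤ q) :
    l.filter (fun q => decide (k ≤ q)) = p :: l.filter (fun q => decide (p + 1 ≤ q)) := by
  induction l with
  | nil => cases hmem
  | cons a l ih =>
    rcases List.mem_cons.mp hmem with rfl | hmem'
    · have hall : ∀ q ∈ l, p < q := fun q hq => (List.pairwise_cons.mp hs).1 q hq
      simp only [List.filter_cons, decide_eq_true_eq]
      rw [if_pos hk, if_neg (by omega)]
      congr 1
      apply List.filter_congr
      intro q hq
      have := hall q hq
      simp; omega
    · have ha : a < p := (List.pairwise_cons.mp hs).1 p hmem'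
      have hka : ¬ k ≤ a := fun h => absurd (hmin a (List.mem_cons_self) h) (by omega)
      simp only [List.filter_cons, decide_eq_true_eq]
      rw [if_neg hka, if_neg (by omega)]
      exact ih (List.pairwise_cons.mp hs).2 hmem' (fun q hq hkq => hmin q (List.mem_cons_of_mem _ hq) hkq)

-- find past the end fails
lemma pvFindFrom_past (cl t : List Char) (k : Nat) (hk : cl.length < k) :
    PySem.Chars.findFrom cl t (k : Int) none = -1 := by
  rw [PySem.Chars.findFrom]
  simp only []
  rw [if_pos (by omega)]

-- occurrences ≥ k exist iff t occurs in drop k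
lemma pvOcc_ge_iff (cl t : List Char) (k : Nat) (hk : k ≤ cl.length) :
    (∃ p ∈ pvOccOf cl t, (k : Int) ≤ p) ↔ t <:+: cl.drop k := by
  rw [← PySem.Chars.isIn_iff_infix, ← PySem.Chars.exists_prefix_drop_iff_isIn]
  constructor
  · rintro ⟨p, hp, hkp⟩
    rw [pvMem_occ] at hp
    refine ⟨p.toNat - k, ?_⟩
    rw [List.drop_drop]
    have : k + (p.toNat - k) = p.toNat := by omega
    rw [this]; exact hp.2.2
  · rintro ⟨j, hj⟩
    rw [List.drop_drop] at hj
    by_cases ht : t = []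
    · exact ⟨(k : Int), (pvMem_occ cl t _).mpr ⟨by omega, by simp [ht]; omega, by simp [ht]⟩, le_refl _⟩
    · have htl : 1 ≤ t.length := by
        cases t with | nil => exact absurd rfl ht | cons a l => simp
      have hle := hj.length_le
      rw [List.length_drop] at hle
      refine ⟨((k + j : Nat) : Int), ?_, by push_cast; omega⟩
      rw [pvMem_occ]
      exact ⟨by omega, by push_cast; omega, by simpa using hj⟩

-- A's while-loop is the fold of pvAStep over the occurrences ≥ position
lemma pvALoop_eq (cl t : List Char) (qts : List String) (ml : Int) (fuel k : Nat)
    (hf : cl.length + 1 ≤ fuel + k) (st : Int × Option Int) :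
    pvALoop cl t qts ml fuel k st =
      ((pvOccOf cl t).filter (fun q => decide ((k : Int) ≤ q))).foldl (pvAStep cl qts ml) st := by
  induction fuel generalizing k st with
  | zero =>
    have hfil : (pvOccOf cl t).filter (fun q => decide ((k : Int) ≤ q)) = [] := by
      rw [List.filter_eq_nil_iff]
      intro p hp
      have := (pvMem_occ cl t p).mp hp
      simp only [decide_eq_true_eq]
      omega
    rw [hfil]; rfl
  | succ fuel ih =>
    rw [pvALoop]
    by_cases hk : k ≤ cl.length
    · by_cases hpos : PySem.Chars.findFrom cl t (k : Int) none = -1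
      · rw [if_pos hpos]
        have hnone : ¬ ∃ p ∈ pvOccOf cl t, (k : Int) ≤ p := by
          rw [pvOcc_ge_iff cl t k hk]
          exact ((PySem.Chars.findFrom_natCast_eq_neg_one_iff cl t k hk).mp hpos)
        have hfil : (pvOccOf cl t).filter (fun q => decide ((k : Int) ≤ q)) = [] := by
          rw [List.filter_eq_nil_iff]
          intro p hp
          simp only [decide_eq_true_eq]
          exact fun h => hnone ⟨p, hp, h⟩
        rw [hfil]; rfl
      · rw [if_neg hpos]
        obtain ⟨hkp, hpre, hmin⟩ := PySem.Chars.findFrom_natCast_spec cl t k hk hpos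
        set p := PySem.Chars.findFrom cl t (k : Int) none with hp
        have hp0 : (0 : Int) ≤ p := le_trans (by positivity) hkp
        have hlen := hpre.length_le
        rw [List.length_drop] at hlen
        have hpt : (p.toNat : Int) = p := Int.toNat_of_nonneg hp0
        have hplen : p.toNat ≤ cl.length := by
          rcases Nat.lt_or_ge cl.length p.toNat with h | h
          swap
          · exact h
          · exfalso
            have ht0 : t = [] := by
              have hnil := hpre
              rw [List.drop_eq_nil_of_le (by omega)] at hnil
              exact List.prefix_nil.mp hnil
            exact hmin cl.length hk (by omega) (by simp [ht0])
        have hmem : p ∈ pvOccOf cl t := (pvMem_occ cl t p).mpr ⟨hp0, by omega, hpre⟩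
        have hminQ : ∀ q ∈ pvOccOf cl t, (k : Int) ≤ q → p ≤ q := by
          intro q hq hkq
          rcases le_or_gt p q with h | hlt
          · exact h
          · exfalso
            obtain ⟨hq0, _, hqpre⟩ := (pvMem_occ cl t q).mp hq
            have hqt : (q.toNat : Int) = q := Int.toNat_of_nonneg hq0
            exact hmin q.toNat (by omega) (by omega) hqpre
        rw [pvFilter_ge_cons _ _ _ (pvOcc_sorted cl t) hmem hkp hminQ, List.foldl_cons]
        rw [ih (p.toNat + 1) (by omega) _]
        have hcast : ((p.toNat + 1 : Nat) : Int) = p + 1 := by omega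
        simp only [hcast]
    · rw [if_pos (pvFindFrom_past cl t k (by omega))]
      have hfil : (pvOccOf cl t).filter (fun q => decide ((k : Int) ≤ q)) = [] := by
        rw [List.filter_eq_nil_iff]
        intro q hq
        have := (pvMem_occ cl t q).mp hq
        simp only [decide_eq_true_eq]
        omega
      rw [hfil]; rfl

-- memoising insert-if-absent fold: lookups of listed keys give f
lemma pvMemo_getD {κ ν : Type} [BEq κ] [LawfulBEq κ] [DecidableEq κ] (f : κ → ν) (d0 : ν)
    (l : List κ) (d : PySem.Dict κ ν)
    (hd : ∀ t, d.contains t = true → d.getD t d0 = f t) (t : κ)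
    (ht : t ∈ l ∨ d.contains t = true) :
    (l.foldl (fun d t => if d.contains t then d else d.insert t (f t)) d).getD t d0
      = f t := by
  induction l generalizing d with
  | nil =>
    rcases ht with h | h
    · cases h
    · exact hd t h
  | cons a l ih =>
    simp only [List.foldl_cons]
    by_cases hc : d.contains a
    · rw [if_pos hc]
      refine ih d hd ?_
      rcases ht with h | h
      · rcases List.mem_cons.mp h with rfl | h'
        · exact Or.inr hc
        · exact Or.inl h'
      · exact Or.inr h
    · rw [if_neg hc]
      refine ih _ ?_ ?_
      · intro u hu
        rw [PySem.Dict.contains_insert] at hu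
        rw [PySem.Dict.getD_insert]
        by_cases hua : u = a
        · rw [if_pos hua, hua]
        · rw [if_neg hua]
          refine hd u ?_
          simpa [hua] using hu
      · rcases ht with h | h
        · rcases List.mem_cons.mp h with rfl | h'
          · exact Or.inr (by rw [PySem.Dict.contains_insert]; simp)
          · exact Or.inl h'
        · exact Or.inr (by rw [PySem.Dict.contains_insert, h]; simp)

-- keys of the memo fold
lemma pvMemo_contains {κ ν : Type} [BEq κ] [LawfulBEq κ] (f : κ → ν)
    (l : List κ) (d : PySem.Dict κ ν) (u : κ) :
    ((l.foldl (fun d t => if d.contains t then d else d.insert t (f t)) d).contains u = true)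
      ↔ u ∈ l ∨ d.contains u = true := by
  induction l generalizing d with
  | nil => simp
  | cons a l ih =>
    simp only [List.foldl_cons]
    by_cases hc : d.contains a
    · rw [if_pos hc, ih]
      constructor
      · rintro (h | h)
        · exact Or.inl (List.mem_cons_of_mem _ h)
        · exact Or.inr h
      · rintro (h | h)
        · rcases List.mem_cons.mp h with rfl | h'
          · exact Or.inr hc
          · exact Or.inl h'
        · exact Or.inr h
    · rw [if_neg hc, ih]
      simp only [PySem.Dict.contains_insert, Bool.or_eq_true, beq_iff_eq, List.mem_cons]
      tauto

-- the memo fold preserves the memo invariant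
lemma pvMemo_inv {κ ν : Type} [BEq κ] [LawfulBEq κ] [DecidableEq κ] (f : κ → ν) (d0 : ν)
    (l : List κ) (d : PySem.Dict κ ν)
    (hd : ∀ t, d.contains t = true → d.getD t d0 = f t) (u : κ)
    (hu : (l.foldl (fun d t => if d.contains t then d else d.insert t (f t)) d).contains u = true) :
    (l.foldl (fun d t => if d.contains t then d else d.insert t (f t)) d).getD u d0 = f u := by
  rcases (pvMemo_contains f l d u).mp hu with h | h
  · exact pvMemo_getD f d0 l d hd u (Or.inl h)
  · exact pvMemo_getD f d0 l d hd u (Or.inr h)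

-- nested memo table: looking up any key listed under some processed t gives f
lemma pvTable_getD (f : Int → Int) (g : List Char → List Int) (ls : List (List Char))
    (d : PySem.Dict Int Int) (hd : ∀ u, d.contains u = true → d.getD u 0 = f u)
    (pos : Int) (hpos : (∃ t ∈ ls, pos ∈ g t) ∨ d.contains pos = true) :
    ((ls.foldl (fun d t => (g t).foldl
        (fun (d : PySem.Dict Int Int) p => if d.contains p then d else d.insert p (f p)) d) d).getD pos 0)
      = f pos := by
  induction ls generalizing d with
  | nil =>
    rcases hpos with ⟨t, ht, _⟩ | h
    · cases ht
    · exact hd pos h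
  | cons a ls ih =>
    simp only [List.foldl_cons]
    refine ih _ (fun u hu => pvMemo_inv f 0 (g a) d hd u hu) ?_
    rcases hpos with ⟨t, ht, hpt⟩ | h
    · rcases List.mem_cons.mp ht with rfl | ht'
      · exact Or.inr ((pvMemo_contains f (g t) d pos).mpr (Or.inl hpt))
      · exact Or.inl ⟨t, ht', hpt⟩
    · exact Or.inr ((pvMemo_contains f (g a) d pos).mpr (Or.inr h))

-- substring-in-window test = existence of an occurrence inside the window (nonempty term,
-- window bounds in range)
lemma pvIsIn_window (cl qt : List Char) (ws we0 : Int) (hqt : qt ≠ []) (hws : 0 ≤ ws)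
    (hwe0 : 0 ≤ we0) (hwe : we0 ≤ (cl.length : Int)) :
    (PySem.Chars.isIn qt (PySem.List.slice cl (some ws) (some we0)) = true) ↔
      ∃ p ∈ pvOccOf cl qt, ws ≤ p ∧ p + qt.length ≤ we0 := by
  have htl : 1 ≤ qt.length := by
    cases qt with | nil => exact absurd rfl hqt | cons a l => simp
  have hsl : PySem.List.slice cl (some ws) (some we0) =
      List.take (PySem.List.clampIdx cl.length we0 - PySem.List.clampIdx cl.length ws)
        (List.drop (PySem.List.clampIdx cl.length ws) cl) := rfl
  set aE := PySem.List.clampIdx cl.length ws with haEdef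
  set bE := PySem.List.clampIdx cl.length we0 with hbEdef
  have haE : aE = min ws.toNat cl.length := pvClampIdx_of_nonneg _ _ hws
  have hbE : (bE : Int) = we0 ∧ bE ≤ cl.length := by
    rw [hbEdef, pvClampIdx_of_nonneg _ _ hwe0]
    constructor <;> omega
  rw [← PySem.Chars.exists_prefix_drop_iff_isIn, hsl]
  constructor
  · rintro ⟨j, hj⟩
    rw [List.drop_take, List.drop_drop, List.prefix_take_iff] at hj
    obtain ⟨hpre, hlen⟩ := hj
    refine ⟨((aE + j : Nat) : Int), (pvMem_occ cl qt _).mpr ⟨by omega, ?_, by simpa using hpre⟩, ?_, ?_⟩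
    · push_cast
      have := hbE.2
      omega
    · push_cast
      omega
    · push_cast
      have := hbE.1
      omega
  · rintro ⟨p, hp, hwsp, hpwe⟩
    obtain ⟨hp0, hpn, hpre⟩ := (pvMem_occ cl qt p).mp hp
    have haEp : aE ≤ p.toNat := by omega
    refine ⟨p.toNat - aE, ?_⟩
    rw [List.drop_take, List.drop_drop, List.prefix_take_iff]
    have hidx : aE + (p.toNat - aE) = p.toNat := by omega
    rw [hidx]
    have := hbE.1
    exact ⟨hpre, by omega⟩

-- the bisect test decides that existence
lemma pvBisect_iff (ps : List Int) (hs : ps.Pairwise (· < ·)) (ws we L : Int) :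
    ((PySem.List.bisectLeft ps ws < ps.length ∧ ps.getD (PySem.List.bisectLeft ps ws) 0 + L ≤ we)
      ↔ ∃ p ∈ ps, ws ≤ p ∧ p + L ≤ we) := by
  have hs' : ps.Pairwise (· ≤ ·) := hs.imp le_of_lt
  obtain ⟨hle, hlt, hge⟩ := PySem.List.bisectLeft_spec ps ws hs'
  set j := PySem.List.bisectLeft ps ws with hj
  constructor
  · rintro ⟨hjl, hcond⟩
    refine ⟨ps[j], List.getElem_mem _, hge j hjl (le_refl _), ?_⟩
    rwa [List.getD_eq_getElem ps 0 hjl] at hcond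
  · rintro ⟨p, hp, hwsp, hpwe⟩
    obtain ⟨i, hi, rfl⟩ := List.getElem_of_mem hp
    have hji : j ≤ i := by
      rcases Nat.lt_or_ge i j with hlt' | h
      · exact absurd (hlt i hi hlt') (by omega)
      · exact h
    have hjl : j < ps.length := lt_of_le_of_lt hji hi
    refine ⟨hjl, ?_⟩
    rw [List.getD_eq_getElem ps 0 hjl]
    have hmono : ps[j] ≤ ps[i] := by
      rcases Nat.lt_or_ge j i with h | h
      · exact le_of_lt ((List.pairwise_iff_getElem.mp hs) j i hjl hi h)
      · have : j = i := by omega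
        subst this; exact le_refl _
    omega

-- the two score computations agree for a nonnegative half-window and a candidate position
lemma pvScore_eq (cl : List Char) (qts : List String) (half pos : Int)
    (hhalf : 0 ≤ half) (hpos0 : 0 ≤ pos) (hposn : pos ≤ (cl.length : Int)) :
    ((qts.map (fun qt => if PySem.Chars.isIn (PySem.Chars.lower qt.toList)
        (PySem.List.slice cl (some (max 0 (pos - half)))
          (some (min ((cl.length : Int)) (pos + half)))) then (1:Int) else 0)).sum)
      = pvBScore cl.length (qts.map (fun t => PySem.Chars.lower t.toList))
          ((qts.map (fun t => PySem.Chars.lower t.toList)).foldl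
            (fun (d : PySem.Dict (List Char) (List Int)) t =>
              if d.contains t then d else d.insert t (pvOccOf cl t)) PySem.Dict.empty)
          half pos := by
  simp only [pvBScore]
  set ws := max 0 (pos - half) with hwsdef
  set we0 := min ((cl.length : Int)) (pos + half) with hwe0def
  set lowered := qts.map (fun t => PySem.Chars.lower t.toList) with hlow
  set occ := lowered.foldl (fun (d : PySem.Dict (List Char) (List Int)) t =>
      if d.contains t then d else d.insert t (pvOccOf cl t)) PySem.Dict.empty with hocc
  have hws : (0 : Int) ≤ ws := le_max_left _ _
  have hwsle : ws ≤ pos := by omega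
  have hwe0 : (0 : Int) ≤ we0 := by omega
  have hwe : we0 ≤ (cl.length : Int) := min_le_left _ _
  have hposwe : pos ≤ we0 := by omega
  have hgetD : ∀ qt ∈ lowered, occ.getD qt [] = pvOccOf cl qt := by
    intro qt hqt
    refine pvMemo_getD (pvOccOf cl) [] lowered PySem.Dict.empty ?_ qt (Or.inl hqt)
    intro u hu
    simp [PySem.Dict.contains, PySem.Dict.empty] at hu
  have hcond : ∀ qt ∈ lowered,
      (PySem.Chars.isIn qt (PySem.List.slice cl (some ws) (some we0)) = true)
        ↔ (PySem.List.bisectLeft (occ.getD qt []) ws < (occ.getD qt []).length ∧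
             (occ.getD qt []).getD (PySem.List.bisectLeft (occ.getD qt []) ws) 0 + qt.length ≤ we0) := by
    intro qt hqt
    rw [hgetD qt hqt, pvBisect_iff (pvOccOf cl qt) (pvOcc_sorted cl qt) ws we0 qt.length]
    by_cases hq : qt = []
    · subst hq
      simp only [PySem.Chars.isIn_nil, List.length_nil, Nat.cast_zero, true_iff]
      refine ⟨ws, (pvMem_occ cl [] ws).mpr ⟨hws, by simp; omega, by simp⟩, le_refl _, by simp; omega⟩
    · exact pvIsIn_window cl qt ws we0 hq hws hwe0 hwe
  have hmapA : (qts.map (fun qt => if PySem.Chars.isIn (PySem.Chars.lower qt.toList)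
        (PySem.List.slice cl (some ws) (some we0)) then (1:Int) else 0))
      = lowered.map (fun t => if PySem.Chars.isIn t (PySem.List.slice cl (some ws) (some we0))
          then (1:Int) else 0) := by
    rw [hlow, List.map_map]
    rfl
  have hB : lowered.foldl (fun (s : Int) qt =>
        let ps := occ.getD qt []
        let j := PySem.List.bisectLeft ps ws
        if j < ps.length ∧ ps.getD j 0 + qt.length ≤ we0 then s + 1 else s) 0
      = lowered.foldl (fun (s : Int) qt =>
          if (fun qt => decide
              (PySem.List.bisectLeft (occ.getD qt []) ws < (occ.getD qt []).length ∧
               (occ.getD qt []).getD (PySem.List.bisectLeft (occ.getD qt []) ws) 0 + qt.length ≤ we0)) qt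
            = true then s + 1 else s) 0 := by
    refine PySem.List.foldl_congr_mem lowered _ _ 0 ?_
    intro s qt _
    simp
  rw [hmapA, hB, PySem.List.sum_map_ite_one_zero, PySem.List.foldl_count_if]
  have hcnt : List.countP
        (fun t => PySem.Chars.isIn t (PySem.List.slice cl (some ws) (some we0))) lowered
      = List.countP (fun qt => decide
          (PySem.List.bisectLeft (occ.getD qt []) ws < (occ.getD qt []).length ∧
           (occ.getD qt []).getD (PySem.List.bisectLeft (occ.getD qt []) ws) 0 + qt.length ≤ we0))
          lowered := by
    apply List.countP_congr
    intro qt hqt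
    simp only [decide_eq_true_eq]
    exact hcond qt hqt
  rw [hcnt]
  omega

-- ===== VERDICT (by name: the statement is the Claim_ definition above) =====
theorem find_best_snippet_position_py_spec : Claim_equal_find_best_snippet_position_py := by
  intro content query_terms max_length _hdom hpre
  unfold Spec_find_best_snippet_position_py
  by_cases hq : query_terms = []
  · simp only [find_best_snippet_position_py, find_best_snippet_position_py_alt, if_pos hq]
  · have hml : (0 : Int) ≤ max_length := hpre.resolve_left hq
    have hhalf : (0 : Int) ≤ PySem.Int.floordiv max_length 2 := by
      rw [PySem.Int.floordiv_eq_ediv_of_pos (by norm_num)]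
      exact Int.ediv_nonneg hml (by norm_num)
    simp only [find_best_snippet_position_py, find_best_snippet_position_py_alt, if_neg hq]
    congr 1
    rw [List.foldl_map]
    apply PySem.List.foldl_congr_mem
    intro st term hterm
    rw [pvALoop_eq (PySem.Chars.lower content.toList) (PySem.Chars.lower term.toList)
      query_terms max_length ((PySem.Chars.lower content.toList).length + 1) 0 (by omega) st]
    have hfil : (pvOccOf (PySem.Chars.lower content.toList) (PySem.Chars.lower term.toList)).filter
        (fun q => decide (((0 : Nat) : Int) ≤ q))
        = pvOccOf (PySem.Chars.lower content.toList) (PySem.Chars.lower term.toList) := by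
      rw [List.filter_eq_self]
      intro p hp
      have := (pvMem_occ _ _ _).mp hp
      simp only [decide_eq_true_eq]
      push_cast
      omega
    rw [hfil]
    have hmemo : ((query_terms.map (fun t => PySem.Chars.lower t.toList)).foldl
          (fun (d : PySem.Dict (List Char) (List Int)) t =>
            if d.contains t then d else d.insert t (pvOccOf (PySem.Chars.lower content.toList) t))
          PySem.Dict.empty).getD (PySem.Chars.lower term.toList) []
        = pvOccOf (PySem.Chars.lower content.toList) (PySem.Chars.lower term.toList) := by
      refine pvMemo_getD _ _ _ _ ?_ _ (Or.inl (List.mem_map_of_mem hterm))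
      intro u hu
      simp [PySem.Dict.contains, PySem.Dict.empty] at hu
    rw [hmemo]
    refine PySem.List.foldl_congr_mem _ _ _ st ?_
    intro st' pos hpos
    obtain ⟨hp0, hpn, _⟩ := (pvMem_occ _ _ _).mp hpos
    have htab : ((query_terms.map (fun t => PySem.Chars.lower t.toList)).foldl
          (fun (d : PySem.Dict Int Int) t =>
            ((((query_terms.map (fun t => PySem.Chars.lower t.toList)).foldl
              (fun (d : PySem.Dict (List Char) (List Int)) t =>
                if d.contains t then d else d.insert t (pvOccOf (PySem.Chars.lower content.toList) t))
              PySem.Dict.empty)).getD t []).foldl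
              (fun (d : PySem.Dict Int Int) p => if d.contains p then d else d.insert p
                (pvBScore (PySem.Chars.lower content.toList).length
                  (query_terms.map (fun t => PySem.Chars.lower t.toList))
                  ((query_terms.map (fun t => PySem.Chars.lower t.toList)).foldl
                    (fun (d : PySem.Dict (List Char) (List Int)) t =>
                      if d.contains t then d else d.insert t (pvOccOf (PySem.Chars.lower content.toList) t))
                    PySem.Dict.empty)
                  (PySem.Int.floordiv max_length 2) p)) d)
          PySem.Dict.empty).getD pos 0
        = pvBScore (PySem.Chars.lower content.toList).length
            (query_terms.map (fun t => PySem.Chars.lower t.toList))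
            ((query_terms.map (fun t => PySem.Chars.lower t.toList)).foldl
              (fun (d : PySem.Dict (List Char) (List Int)) t =>
                if d.contains t then d else d.insert t (pvOccOf (PySem.Chars.lower content.toList) t))
              PySem.Dict.empty)
            (PySem.Int.floordiv max_length 2) pos := by
      refine pvTable_getD _ _ _ _ ?_ pos (Or.inl ⟨PySem.Chars.lower term.toList,
        List.mem_map_of_mem hterm, by rw [hmemo]; exact hpos⟩)
      intro u hu
      simp [PySem.Dict.contains, PySem.Dict.empty] at hu
    simp only [pvAStep]
    rw [htab, pvScore_eq (PySem.Chars.lower content.toList) query_terms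
      (PySem.Int.floordiv max_length 2) pos hhalf hp0 (by omega)]
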